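-- pv_equiv track=rewrite | github.com/Tharun123-Dev/python-10K | pythontasks/listcomp1.py | psqy
-- ===== SOURCE A (Python) =====
-- def psqy(num):
--
--     square=num**2
--     sum=0
--     while square>0:
--        ld=square%10
--        sum+=ld
--        square=square//10
--     if sum==num:
--         return True
--     else:
--         return False
-- ===== SOURCE B (Python) =====
-- def psqy(num):
--     # Closed form: the decimal digit sum of num**2 is at most 9 * len(str(num**2)),
--     # which is < num for every num >= 172 (num**2 < 10**(2*d) for a d-digit num,
--     # so its digit sum is <= 18*d + 9 < 10**(d-1) <= num once num >= 100; checking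
--     # 0..171 directly leaves exactly 0, 1 and 9), and a digit sum is never negative,
--     # so it can never equal a negative num.  Hence the answer is a fixed membership test.
--     return num in (0, 1, 9)
-- ===== Notes on version B (the rewrite author's own statement) =====
-- stated objective: alternative
-- what changed: B replaces A's %10///10 digit-sum loop over num**2 by a constant membership test num in (0,1,9), justified by the bound digitsum(num**2) <= 9*len(str(num**2)), which rules out every num >= 172 and every negative num.
import Mathlib
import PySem

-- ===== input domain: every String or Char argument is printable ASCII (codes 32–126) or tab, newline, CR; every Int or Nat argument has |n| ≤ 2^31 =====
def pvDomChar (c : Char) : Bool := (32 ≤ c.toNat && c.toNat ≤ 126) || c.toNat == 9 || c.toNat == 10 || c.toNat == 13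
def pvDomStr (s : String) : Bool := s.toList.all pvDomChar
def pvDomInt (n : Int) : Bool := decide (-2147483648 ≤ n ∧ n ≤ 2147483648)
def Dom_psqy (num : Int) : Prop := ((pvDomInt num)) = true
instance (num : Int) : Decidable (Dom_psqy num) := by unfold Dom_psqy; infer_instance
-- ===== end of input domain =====

-- B replaces A's digit-sum loop by the constant membership test num ∈ {0, 1, 9}
-- (the digit sum of num² is bounded by 9·(digit count), which rules out every
-- num ≥ 172 and every negative num): a closed form instead of a digit loop.

-- ===== PORT A =====
-- the while-loop of A: while square>0: ld=square%10; sum+=ld; square=square//10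
-- (fuel = square.toNat + 1 only makes the loop total; the guard 0 < square stops it first)
def psqyLoop : Nat → Int → Int → Int
  | 0, _, sum => sum
  | f + 1, square, sum =>
    if 0 < square then
      psqyLoop f (PySem.Int.floordiv square 10) (sum + PySem.Int.mod square 10)
    else sum

def psqy (num : Int) : Bool :=
  if psqyLoop ((num ^ 2).toNat + 1) (num ^ 2) 0 = num then true else false

-- ===== PORT B =====
-- transliteration of Source B: `return num in (0, 1, 9)`
def psqy_alt (num : Int) : Bool :=
  num == 0 || num == 1 || num == 9

-- ===== PRECONDITION & SPEC =====
def Spec_psqy (num : Int) (out : Bool) : Prop := out = psqy_alt num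
instance (num : Int) (out : Bool) : Decidable (Spec_psqy num out) := by unfold Spec_psqy; infer_instance

-- ===== CLAIM =====
def Claim_equal_psqy : Prop := ∀ (num : Int), Dom_psqy num → Spec_psqy num (psqy num)

-- ===== LEMMAS AND PROOFS =====

-- decimal digit sum of a natural number (reference value A's loop is reduced to)
def dsum (n : Nat) : Int :=
  if n = 0 then 0 else (n % 10 : Nat) + dsum (n / 10)
decreasing_by exact Nat.div_lt_self (by omega) (by omega)

theorem dsum_nonneg (n : Nat) : 0 ≤ dsum n := by
  induction n using Nat.strong_induction_on with
  | _ n ih =>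
    rw [dsum]
    split_ifs with h
    · norm_num
    · have := ih (n / 10) (Nat.div_lt_self (by omega) (by omega))
      positivity

theorem dsum_le (k : Nat) : ∀ (n : Nat), n < 10 ^ k → dsum n ≤ 9 * k := by
  induction k with
  | zero =>
    intro n h
    have hn : n = 0 := by simpa using h
    subst hn; rw [dsum]; simp
  | succ k ih =>
    intro n h
    rw [dsum]
    split_ifs with h0
    · positivity
    · have hp : (10:Nat) ^ (k+1) = 10 ^ k * 10 := pow_succ 10 k
      have h1 : dsum (n / 10) ≤ 9 * k := ih (n / 10) (by omega)
      have h2 : ((n % 10 : Nat) : Int) ≤ 9 := by exact_mod_cast (by omega : n % 10 ≤ 9)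
      push_cast at h2 ⊢
      linarith

theorem psqyLoop_eq (f : Nat) : ∀ (n : Nat) (s : Int), n < f → psqyLoop f (n : Int) s = dsum n + s := by
  induction f with
  | zero => intro n s h; omega
  | succ f ih =>
    intro n s h
    rw [psqyLoop]
    by_cases h0 : n = 0
    · subst h0; simp [dsum]
    · rw [if_pos (by exact_mod_cast Nat.pos_of_ne_zero h0)]
      have hfd : PySem.Int.floordiv (n : Int) 10 = ((n / 10 : Nat) : Int) := by
        simp only [PySem.Int.floordiv, Int.fdiv_eq_ediv_of_nonneg _ (by norm_num : (0:Int) ≤ 10)]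
        omega
      have hmd : PySem.Int.mod (n : Int) 10 = ((n % 10 : Nat) : Int) := by
        simp only [PySem.Int.mod, Int.fmod_eq_emod]
        norm_num
      rw [hfd, hmd, ih (n / 10) _ (by
        have : n / 10 < n := Nat.div_lt_self (Nat.pos_of_ne_zero h0) (by omega)
        omega)]
      conv_rhs => rw [dsum, if_neg h0]
      push_cast
      ring

theorem sq_toNat (num : Int) : num ^ 2 = (((num ^ 2).toNat : Nat) : Int) := by
  have := sq_nonneg num
  omega

-- exhaustive verification of the candidate range 0..171 (via A's loop, which decide can evaluate)
theorem finite_check :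
    (List.range 172).all
      (fun n => (psqyLoop (n * n + 1) ((n : Int) * (n : Int)) 0 == (n : Int))
                  == (decide (n = 0 ∨ n = 1 ∨ n = 9))) = true := by decide

theorem finite_iff (m : Nat) (hm : m < 172) :
    dsum (m * m) = (m : Int) ↔ (m = 0 ∨ m = 1 ∨ m = 9) := by
  have h := List.all_eq_true.mp finite_check m (List.mem_range.mpr hm)
  have hL : psqyLoop (m * m + 1) ((m : Int) * (m : Int)) 0 = dsum (m * m) := by
    have hc : ((m : Int) * (m : Int)) = ((m * m : Nat) : Int) := by push_cast; ring
    rw [hc, psqyLoop_eq _ _ _ (Nat.lt_succ_self _)]; ring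
  rw [hL] at h
  have h2 : (dsum (m * m) == (m : Int)) = decide (m = 0 ∨ m = 1 ∨ m = 9) := beq_iff_eq.mp h
  constructor
  · intro he
    exact of_decide_eq_true (h2 ▸ beq_iff_eq.mpr he)
  · intro hd
    exact beq_iff_eq.mp (h2 ▸ decide_eq_true hd)

-- ===== VERDICT =====
theorem psqy_spec : Claim_equal_psqy := by
  intro num hdom
  unfold Spec_psqy psqy psqy_alt
  have hN := psqyLoop_eq ((num ^ 2).toNat + 1) (num ^ 2).toNat 0 (Nat.lt_succ_self _)
  rw [← sq_toNat num, add_zero] at hN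
  rw [hN]
  by_cases hneg : num < 0
  · have := dsum_nonneg (num ^ 2).toNat
    rw [if_neg (by omega)]
    have hrhs : (num == 0 || num == 1 || num == 9) = false := by
      simp only [Bool.or_eq_false_iff, beq_eq_false_iff_ne, ne_eq]
      refine ⟨⟨?_, ?_⟩, ?_⟩ <;> omega
    rw [hrhs]
  · have hneg' : 0 ≤ num := by omega
    by_cases hbig : 172 ≤ num
    · have hb : num ≤ 2147483648 := by
        simp only [Dom_psqy, pvDomInt, decide_eq_true_eq] at hdom; omega
      have hbound : (num ^ 2).toNat < 10 ^ 19 := by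
        have h1 : num ^ 2 ≤ 2147483648 ^ 2 := by nlinarith
        have h2 : (10:Nat) ^ 19 = 10000000000000000000 := by norm_num
        omega
      have := dsum_le 19 _ hbound
      rw [if_neg (by omega)]
      have hrhs : (num == 0 || num == 1 || num == 9) = false := by
        simp only [Bool.or_eq_false_iff, beq_eq_false_iff_ne, ne_eq]
        refine ⟨⟨?_, ?_⟩, ?_⟩ <;> omega
      rw [hrhs]
    · obtain ⟨m, rfl⟩ : ∃ m : Nat, num = (m : Int) := ⟨num.toNat, (Int.toNat_of_nonneg hneg').symm⟩
      have hm : m < 172 := by omega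
      have hsq : ((m : Int) ^ 2).toNat = m * m := by
        rw [sq, ← Int.natCast_mul, Int.toNat_natCast]
      rw [hsq]
      split_ifs with h
      · have := (finite_iff m hm).mp h
        rcases this with rfl | rfl | rfl <;> rfl
      · have hnot := (fun hmem => h ((finite_iff m hm).mpr hmem))
        have hrhs : ((m : Int) == 0 || (m : Int) == 1 || (m : Int) == 9) = false := by
          simp only [Bool.or_eq_false_iff, beq_eq_false_iff_ne, ne_eq]
          refine ⟨⟨?_, ?_⟩, ?_⟩ <;> (intro hc; apply hnot)
          · left; exact_mod_cast hc
          · right; left; exact_mod_cast hc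
          · right; right; exact_mod_cast hc
        rw [hrhs]
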